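-- pv_equiv track=rewrite | github.com/tofran/pixels-approvals | pixels_approvals.py | gen_timeline
-- ===== SOURCE A (Python) =====
-- def gen_timeline(data):
--     timeline = dict()
--     for each in data:
--         day = each['created'][:10]
--         if day not in timeline:
--             timeline[day] = list()
--         timeline[day].append(each['user'])
--     return timeline
-- ===== SOURCE B (Python) =====
-- def gen_timeline(data):
--     days = dict.fromkeys(each['created'][:10] for each in data)
--     return {
--         day: [each['user'] for each in data if each['created'][:10] == day]
--         for day in days
--     }
-- ===== Notes on version B (the rewrite author's own statement) =====
-- stated objective: alternative
-- what changed: A builds the grouping incrementally in one pass with a mutable dict; B first computes the ordered distinct days (dict.fromkeys) and then builds the result with a dict comprehension whose values come from a per-day filtering pass over the data.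
import Mathlib
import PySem

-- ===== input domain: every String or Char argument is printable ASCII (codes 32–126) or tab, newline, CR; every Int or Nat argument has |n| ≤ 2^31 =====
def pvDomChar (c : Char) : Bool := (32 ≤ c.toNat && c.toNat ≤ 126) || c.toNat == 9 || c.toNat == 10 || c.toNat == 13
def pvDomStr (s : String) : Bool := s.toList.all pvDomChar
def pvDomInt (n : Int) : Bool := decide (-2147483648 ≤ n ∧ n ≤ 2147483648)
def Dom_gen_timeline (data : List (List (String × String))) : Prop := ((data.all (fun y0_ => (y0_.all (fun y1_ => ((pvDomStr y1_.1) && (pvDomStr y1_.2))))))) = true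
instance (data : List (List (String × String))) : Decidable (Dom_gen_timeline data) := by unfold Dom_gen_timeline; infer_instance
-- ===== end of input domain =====

-- B replaces A's one-pass mutable-dict grouping by an ordered-distinct-days pass plus a per-day filtering comprehension (objective: alternative decomposition, same result).
-- ===== PORT A =====
-- each['created'][:10]  (getD is exact under Pre_, which requires the key to be present)
def pvDay (each : List (String × String)) : String :=
  PySem.Str.slice ((PySem.Dict.mk each).getD "created" "") none (some 10)

-- each['user']
def pvUser (each : List (String × String)) : String :=
  (PySem.Dict.mk each).getD "user" ""

def gen_timeline (data : List (List (String × String))) : List (String × List String) :=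
  (data.foldl
    (fun timeline each =>
      let day := pvDay each
      let timeline := if timeline.contains day then timeline else timeline.insert day []
      timeline.modify day [] (fun l => l ++ [pvUser each]))
    (PySem.Dict.empty : PySem.Dict String (List String))).items

-- ===== PORT B =====
def gen_timeline_alt (data : List (List (String × String))) : List (String × List String) :=
  (PySem.List.dedup (data.map pvDay)).map
    (fun day => (day, (data.filter (fun each => pvDay each == day)).map pvUser))

-- ===== PRECONDITION & SPEC =====
-- Pre_ excludes records missing the 'created' or 'user' key, on which both A and B raise KeyError.
def Pre_gen_timeline (data : List (List (String × String))) : Prop :=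
  ∀ each ∈ data, (PySem.Dict.mk each).contains "created" = true ∧ (PySem.Dict.mk each).contains "user" = true
instance (data : List (List (String × String))) : Decidable (Pre_gen_timeline data) := by unfold Pre_gen_timeline; infer_instance

def pvWitness_gen_timeline : (List (List (String × String))) :=
  [[("created", "2020-01-02T10:00"), ("user", "a")], [("created", "2020-01-01"), ("user", "b")]]

def Spec_gen_timeline (data : List (List (String × String))) (out : List (String × List String)) : Prop := out = gen_timeline_alt data
instance (data : List (List (String × String))) (out : List (String × List String)) : Decidable (Spec_gen_timeline data out) := by unfold Spec_gen_timeline; infer_instance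

-- ===== CLAIM (what is proved, stated in full; the proofs are below) =====
def Claim_equal_gen_timeline : Prop := ∀ (data : List (List (String × String))), Dom_gen_timeline data → Pre_gen_timeline data → Spec_gen_timeline data (gen_timeline data)

-- ===== LEMMAS AND PROOFS =====

-- A's loop body equals a single modify (insert of [] then append = append to default []).
theorem pv_step_eq_modify (d : PySem.Dict String (List String)) (each : List (String × String)) :
    (let day := pvDay each
     let d' := if d.contains day then d else d.insert day []
     d'.modify day [] (fun l => l ++ [pvUser each]))
    = d.modify (pvDay each) [] (fun l => l ++ [pvUser each]) := by
  by_cases h : d.contains (pvDay each) = true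
  · simp [h]
  · simp only [Bool.not_eq_true] at h
    simp only [h, if_neg Bool.false_ne_true]
    rw [PySem.Dict.modify, PySem.Dict.modify, PySem.Dict.getD_insert_self,
      PySem.Dict.insert_insert_self, PySem.Dict.getD_of_not_contains d [] h]

-- the fold, with the loop body rewritten to the single-modify form
theorem pv_fold_eq (data : List (List (String × String))) :
    (data.foldl
      (fun timeline each =>
        let day := pvDay each
        let timeline := if timeline.contains day then timeline else timeline.insert day []
        timeline.modify day [] (fun l => l ++ [pvUser each]))
      (PySem.Dict.empty : PySem.Dict String (List String)))
    = data.foldl (fun d each => d.modify (pvDay each) [] (fun l => l ++ [pvUser each])) PySem.Dict.empty := by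
  congr 1
  funext d each
  exact pv_step_eq_modify d each

-- ===== VERDICT (by name: the statement is the Claim_ definition above) =====
theorem gen_timeline_spec : Claim_equal_gen_timeline := by
  intro data _ _
  unfold Spec_gen_timeline gen_timeline gen_timeline_alt
  rw [pv_fold_eq]
  have hkeys : (data.foldl (fun d each => d.modify (pvDay each) [] (fun l => l ++ [pvUser each])) PySem.Dict.empty).keys
      = PySem.Set.ofList (data.map pvDay) := by
    rw [PySem.Dict.keys_foldl_modify_key data pvDay [] (fun _ each => fun l => l ++ [pvUser each])]
    rw [PySem.Dict.keys_empty, PySem.Set.update_nil_left]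
  have hnd : (data.foldl (fun d each => d.modify (pvDay each) [] (fun l => l ++ [pvUser each])) PySem.Dict.empty).keys.Nodup := by
    rw [hkeys]; exact PySem.Set.nodup_ofList _
  rw [PySem.Dict.items_eq_map_keys _ hnd [], hkeys]
  have : PySem.List.dedup (data.map pvDay) = PySem.Set.ofList (data.map pvDay) := rfl
  rw [this]
  apply List.map_congr_left
  intro day _
  have hfold : (data.foldl (fun d each => d.modify (pvDay each) [] (fun l => l ++ [pvUser each])) PySem.Dict.empty)
      = ((data.map (fun each => (pvDay each, pvUser each))).foldl
          (fun d p => d.modify p.1 [] (fun l => l ++ [p.2])) PySem.Dict.empty) := by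
    rw [List.foldl_map]
  rw [hfold, PySem.Dict.getD_foldl_modify_append]
  simp [List.filter_map, Function.comp_def, List.map_map]
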